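-- pv_equiv track=rewrite | github.com/fwcd/advent-of-code-2015 | src/day19.py | trans_unit
-- ===== SOURCE A (Python) =====
-- def nonterminals(cfg):
--     return set([lhs for [lhs, _] in cfg])
--
-- def trans_unit(cfg):
--     nons = nonterminals(cfg)
--     new = []
--     for [lhs, rhs] in cfg:
--         transitive = rhs
--         while len(transitive) == 1 and transitive[0] in nons:
--             transitive = [r for [l, r] in cfg if l == transitive[0]][0]
--         new.append([lhs, transitive])
--     return new
-- ===== SOURCE B (Python) =====
-- def trans_unit(cfg):
--     first = {}
--     for lhs, rhs in cfg:
--         if lhs not in first: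
--             first[lhs] = rhs
--     table = {}
--     for n in first:
--         t = first[n]
--         while len(t) == 1 and t[0] in first:
--             t = first[t[0]]
--         table[n] = t
--     new = []
--     for lhs, rhs in cfg:
--         if len(rhs) == 1 and rhs[0] in table:
--             new.append([lhs, table[rhs[0]]])
--         else:
--             new.append([lhs, rhs])
--     return new
-- ===== Notes on version B (the rewrite author's own statement) =====
-- stated objective: alternative
-- what changed: B precomputes a first-production dict and resolves each distinct nonterminal's unit chain once into a table, then maps over cfg in one flat pass, instead of A's per-production chain chase whose every step rescans the whole grammar with a list comprehension; it trades A's repeated scans for two dict-building passes.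
import Mathlib
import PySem

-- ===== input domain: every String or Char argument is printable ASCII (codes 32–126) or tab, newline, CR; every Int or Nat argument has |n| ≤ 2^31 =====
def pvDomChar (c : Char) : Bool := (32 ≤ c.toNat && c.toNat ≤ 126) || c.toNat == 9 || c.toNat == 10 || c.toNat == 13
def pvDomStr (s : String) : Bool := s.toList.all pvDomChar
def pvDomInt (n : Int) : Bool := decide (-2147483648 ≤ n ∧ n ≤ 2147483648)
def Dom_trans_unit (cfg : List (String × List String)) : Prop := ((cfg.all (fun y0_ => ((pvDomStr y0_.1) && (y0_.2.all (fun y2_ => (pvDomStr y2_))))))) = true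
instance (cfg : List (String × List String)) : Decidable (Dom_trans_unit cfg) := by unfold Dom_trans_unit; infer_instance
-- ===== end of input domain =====

-- B resolves each distinct nonterminal's unit chain once into a table (dict lookups) and then
-- maps over cfg in one flat pass, instead of A's per-production chase that rescans cfg each step.
-- On grammars with a cyclic unit-production chain both Pythons loop forever; the fueled ports
-- agree on all inputs, so equivalence is proved unconditionally.


-- ===== PORT A =====
-- nonterminals(cfg) = set of all lhs
def nonterminalsA (cfg : List (String × List String)) : PySem.Set String :=
  PySem.Set.ofList (cfg.map Prod.fst)

-- A's while loop: fuel (cfg.length + 1) is a totality guard only; whenever the Python loop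
-- terminates it exits before the fuel runs out (Python has no fuel).
def chaseA (cfg : List (String × List String)) (nons : PySem.Set String) :
    Nat → List String → List String
  | 0, t => t
  | f + 1, t =>
    match t with
    | [x] =>
      if PySem.Set.contains nons x then
        match (cfg.filter (fun p => p.1 == x)).map Prod.snd with
        | r :: _ => chaseA cfg nons f r
        | [] => t        -- unreachable: x ∈ nons means some production has lhs x
      else t
    | _ => t

def trans_unit (cfg : List (String × List String)) : List (String × List String) :=
  let nons := nonterminalsA cfg
  cfg.foldl (fun new p => new ++ [(p.1, chaseA cfg nons (cfg.length + 1) p.2)]) []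

-- ===== PORT B =====
-- first = dict of each lhs's first production
def firstDict (cfg : List (String × List String)) : PySem.Dict String (List String) :=
  cfg.foldl (fun d p => if d.contains p.1 then d else d.insert p.1 p.2) PySem.Dict.empty

-- B's while loop; fuel cfg.length is a totality guard only (see chaseA)
def chaseB (first : PySem.Dict String (List String)) :
    Nat → List String → List String
  | 0, t => t
  | f + 1, t =>
    match t with
    | [x] =>
      match first.get? x with
      | some r => chaseB first f r
      | none => t
    | _ => t

def tableDict (first : PySem.Dict String (List String)) (fuel : Nat) :
    PySem.Dict String (List String) :=
  first.keys.foldl (fun tb n => tb.insert n (chaseB first fuel (first.getD n []))) PySem.Dict.empty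

def trans_unit_alt (cfg : List (String × List String)) : List (String × List String) :=
  let first := firstDict cfg
  let table := tableDict first cfg.length
  cfg.foldl (fun new p =>
    new ++ [match p.2 with
            | [x] =>
              match table.get? x with
              | some v => (p.1, v)
              | none => (p.1, p.2)
            | _ => (p.1, p.2)]) []

-- ===== PRECONDITION & SPEC =====
def Spec_trans_unit (cfg : List (String × List String)) (out : List (String × List String)) : Prop := out = trans_unit_alt cfg
instance (cfg : List (String × List String)) (out : List (String × List String)) : Decidable (Spec_trans_unit cfg out) := by unfold Spec_trans_unit; infer_instance

-- ===== CLAIM (what is proved, stated in full; the proofs are below) =====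
def Claim_equal_trans_unit : Prop := ∀ (cfg : List (String × List String)), Dom_trans_unit cfg → Spec_trans_unit cfg (trans_unit cfg)

-- ===== LEMMAS AND PROOFS =====

-- first-production dict = first match in cfg
theorem firstDict_aux (l : List (String × List String)) (d : PySem.Dict String (List String))
    (x : String) :
    (l.foldl (fun d p => if d.contains p.1 then d else d.insert p.1 p.2) d).get? x =
      ((d.get? x).orElse fun _ => ((l.filter (fun p => p.1 == x)).map Prod.snd).head?) := by
  induction l generalizing d with
  | nil => cases hd : d.get? x <;> simp [hd, Option.orElse]
  | cons p l ih =>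
    simp only [List.foldl_cons]
    rw [ih]
    cases hc : d.contains p.1 with
    | true =>
      simp only [if_true]
      by_cases hx : p.1 = x
      · have hne : d.get? x ≠ none := by
          intro h
          rw [PySem.Dict.get?_eq_none_iff_contains] at h
          subst hx; rw [hc] at h; simp at h
        cases hdx : d.get? x with
        | none => exact absurd hdx hne
        | some v => simp [Option.orElse]
      · simp [hx]
    | false =>
      simp only [Bool.false_eq_true, if_false]
      by_cases hx : p.1 = x
      · subst hx
        have hd : d.get? p.1 = none := by
          rw [PySem.Dict.get?_eq_none_iff_contains]; exact hc
        simp [hd, Option.orElse]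
      · rw [PySem.Dict.get?_insert_of_ne (d := d) (v := p.2) (fun h => hx (Eq.symm h))]
        simp [hx]

theorem firstDict_get (cfg : List (String × List String)) (x : String) :
    (firstDict cfg).get? x = ((cfg.filter (fun p => p.1 == x)).map Prod.snd).head? := by
  rw [firstDict, firstDict_aux]
  simp [Option.orElse]

-- the table holds each of first's keys' resolved chain
theorem tableDict_aux (l : List String) (first : PySem.Dict String (List String)) (fuel : Nat)
    (tb : PySem.Dict String (List String)) (x : String) :
    (l.foldl (fun tb n => tb.insert n (chaseB first fuel (first.getD n []))) tb).get? x =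
      if x ∈ l then some (chaseB first fuel (first.getD x [])) else tb.get? x := by
  induction l generalizing tb with
  | nil => simp
  | cons n l ih =>
    simp only [List.foldl_cons]
    rw [ih]
    by_cases hl : x ∈ l
    · simp [hl]
    · by_cases hx : x = n
      · subst hx
        simp [hl, PySem.Dict.get?_insert_self]
      · simp only [List.mem_cons, hl, hx, or_self, if_false]
        exact PySem.Dict.get?_insert_of_ne (d := tb) (v := chaseB first fuel (first.getD n [])) hx

theorem tableDict_get (first : PySem.Dict String (List String)) (fuel : Nat) (x : String) :
    (tableDict first fuel).get? x =
      if x ∈ first.keys then some (chaseB first fuel (first.getD x [])) else none := by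
  rw [tableDict, tableDict_aux]
  simp

theorem mem_nons_iff (cfg : List (String × List String)) (x : String) :
    PySem.Set.contains (nonterminalsA cfg) x = true ↔ x ∈ cfg.map Prod.fst := by
  simp [nonterminalsA, PySem.Set.contains]

-- the two chain chasers agree: A's inner rescans of cfg find exactly first's entries
theorem chase_eq (cfg : List (String × List String)) (f : Nat) (t : List String) :
    chaseA cfg (nonterminalsA cfg) f t = chaseB (firstDict cfg) f t := by
  induction f generalizing t with
  | zero => rfl
  | succ f ih =>
    match t with
    | [] => rfl
    | x :: y :: rest => rfl
    | [x] =>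
      simp only [chaseA, chaseB]
      by_cases hx : x ∈ cfg.map Prod.fst
      · have hcont : PySem.Set.contains (nonterminalsA cfg) x = true := (mem_nons_iff cfg x).mpr hx
        simp only [hcont, if_true]
        have hne : (cfg.filter (fun p => p.1 == x)).map Prod.snd ≠ [] := by
          simp only [ne_eq, List.map_eq_nil_iff, List.filter_eq_nil_iff]
          push Not
          obtain ⟨p, hp, hfst⟩ := List.mem_map.mp hx
          exact ⟨p, hp, by simp [hfst]⟩
        cases hm : (cfg.filter (fun p => p.1 == x)).map Prod.snd with
        | nil => exact absurd hm hne
        | cons r rest' =>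
          rw [firstDict_get, hm]
          simp only [List.head?_cons]
          exact ih r
      · have hcont : PySem.Set.contains (nonterminalsA cfg) x = false := by
          rw [← Bool.not_eq_true]
          exact fun h => hx ((mem_nons_iff cfg x).mp h)
        have hnone : (firstDict cfg).get? x = none := by
          rw [firstDict_get]
          simp only [List.head?_eq_none_iff, List.map_eq_nil_iff, List.filter_eq_nil_iff]
          intro p hp hbe
          exact hx (List.mem_map.mpr ⟨p, hp, by simpa using hbe⟩)
        rw [hnone, hcont]
        simp

theorem trans_unit_eq (cfg : List (String × List String)) :
    trans_unit cfg = trans_unit_alt cfg := by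
  rw [trans_unit, trans_unit_alt]
  rw [PySem.List.foldl_append_singleton_eq_map, PySem.List.foldl_append_singleton_eq_map]
  apply List.map_congr_left
  intro p _
  match hp2 : p.2 with
  | [] => simp [chaseA, ← hp2]
  | x :: y :: rest => simp [chaseA, ← hp2]
  | [x] =>
    by_cases hx : x ∈ cfg.map Prod.fst
    · -- x is a nonterminal: A takes one chase step to first[x], B looks the result up in the table
      have hne : (cfg.filter (fun p => p.1 == x)).map Prod.snd ≠ [] := by
        simp only [ne_eq, List.map_eq_nil_iff, List.filter_eq_nil_iff]
        push Not
        obtain ⟨q, hq, hfst⟩ := List.mem_map.mp hx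
        exact ⟨q, hq, by simp [hfst]⟩
      cases hm : (cfg.filter (fun p => p.1 == x)).map Prod.snd with
      | nil => exact absurd hm hne
      | cons r rest' =>
        have hget : (firstDict cfg).get? x = some r := by
          rw [firstDict_get, hm]; rfl
        have hkeys : x ∈ (firstDict cfg).keys := by
          by_contra hk
          rw [← PySem.Dict.get?_eq_none_iff_not_mem_keys] at hk
          rw [hget] at hk; simp at hk
        have hA : chaseA cfg (nonterminalsA cfg) (cfg.length + 1) [x] =
            chaseA cfg (nonterminalsA cfg) cfg.length r := by
          simp only [chaseA, (mem_nons_iff cfg x).mpr hx, if_true, hm]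
        have hgd : (firstDict cfg).getD x [] = r := by
          rw [PySem.Dict.getD_eq_get?_getD, hget]; rfl
        have hT : (tableDict (firstDict cfg) cfg.length).get? x =
            some (chaseB (firstDict cfg) cfg.length r) := by
          rw [tableDict_get]
          simp [hkeys, hgd]
        rw [hA, chase_eq]
        simp [hT]
    · have hcont : PySem.Set.contains (nonterminalsA cfg) x = false := by
        rw [← Bool.not_eq_true]
        exact fun h => hx ((mem_nons_iff cfg x).mp h)
      have hnone : (firstDict cfg).get? x = none := by
        rw [firstDict_get]
        simp only [List.head?_eq_none_iff, List.map_eq_nil_iff, List.filter_eq_nil_iff]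
        intro q hq hbe
        exact hx (List.mem_map.mpr ⟨q, hq, by simpa using hbe⟩)
      have hnk : x ∉ (firstDict cfg).keys := by
        rw [← PySem.Dict.get?_eq_none_iff_not_mem_keys]
        exact hnone
      have hT : (tableDict (firstDict cfg) cfg.length).get? x = none := by
        rw [tableDict_get]; simp [hnk]
      simp [chaseA, hT, ← hp2, nonterminalsA, PySem.Set.mem_ofList, hx]







-- ===== VERDICT (by name: the statement is the Claim_ definition above) =====
theorem trans_unit_spec : Claim_equal_trans_unit := by
  intro cfg _
  unfold Spec_trans_unit
  exact trans_unit_eq cfg
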